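-- pv_equiv track=rewrite | github.com/mewsieworld/MewBox-MultiXML-Toolbox | Prototype stuff/box_tool_suite_v12.py | _find_value_col
-- ===== SOURCE A (Python) =====
-- _TICKET_NAMES     = {"tickets","ticket"}
--
-- _NCASH_NAMES      = {"ncash","ncash_val","ncashval"}
--
-- def _find_value_col(raw_headers, id_pos):
--     next_id = next((i for i in range(id_pos+1,len(raw_headers))
--                     if raw_headers[i].lower()=="id"), len(raw_headers))
--     for i in range(id_pos+1, next_id):
--         h = raw_headers[i].lower()
--         if h in _TICKET_NAMES: return i,"tickets"
--         if h in _NCASH_NAMES:  return i,"ncash"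
--     return None, None
-- ===== SOURCE B (Python) =====
-- _LABELS = {"tickets": "tickets", "ticket": "tickets",
--            "ncash": "ncash", "ncash_val": "ncash", "ncashval": "ncash"}
--
--
-- def _find_value_col(raw_headers, id_pos):
--     # Table-driven while loop: one classification dict replaces A's two membership
--     # sets, and the 'stop at the next id column' rule is a break inside the single
--     # scan instead of A's separate boundary-finding generator pass.
--     n = len(raw_headers)
--     i = id_pos + 1
--     while i < n:
--         h = raw_headers[i].lower()
--         if h == "id":
--             break
--         lab = _LABELS.get(h)
--         if lab is not None:
--             return i, lab
--         i += 1
--     return None, None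
-- ===== Notes on version B (the rewrite author's own statement) =====
-- stated objective: simpler
-- what changed: B replaces A's two-phase approach (a generator pre-scan computing the next 'id' boundary, then a bounded for-loop with two membership sets) with a single table-driven while loop: one name-to-label dict classifies each header and the 'id' stop is a break folded into the scan.
import Mathlib
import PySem

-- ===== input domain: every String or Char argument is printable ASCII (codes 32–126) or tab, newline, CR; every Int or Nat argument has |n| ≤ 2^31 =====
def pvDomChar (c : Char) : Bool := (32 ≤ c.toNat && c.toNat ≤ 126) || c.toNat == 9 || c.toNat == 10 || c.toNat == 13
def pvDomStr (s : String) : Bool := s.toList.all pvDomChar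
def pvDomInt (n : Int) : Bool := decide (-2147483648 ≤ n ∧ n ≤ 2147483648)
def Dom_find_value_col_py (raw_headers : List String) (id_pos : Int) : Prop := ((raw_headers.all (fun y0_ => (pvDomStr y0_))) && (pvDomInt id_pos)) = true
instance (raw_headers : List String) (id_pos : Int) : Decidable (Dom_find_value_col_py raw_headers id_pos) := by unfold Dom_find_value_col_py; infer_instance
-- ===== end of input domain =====

-- ===== PORT A =====
-- B replaces A's two-phase scan (boundary pre-scan + bounded for-loop over two sets)
-- with one table-driven while loop; return values are identical under Pre_.
-- A raises IndexError when id_pos + 1 < -len(raw_headers) (B raises there too): excluded by Pre_.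

-- the generator scan: first i in the index list whose header lowers to "id", else the default
def fvcA_nextId (raw : List String) : List Int → Int → Int
  | [], dflt => dflt
  | i :: rest, dflt =>
    match PySem.List.pyGet? raw i with
    | some h => if PySem.Str.lower h = "id" then i else fvcA_nextId raw rest dflt
    | none => dflt   -- IndexError in Python; unreachable under Pre_

-- the bounded for-loop over range(id_pos+1, next_id)
def fvcA_loop (raw : List String) : List Int → Option Int × Option String
  | [] => (none, none)
  | i :: rest =>
    match PySem.List.pyGet? raw i with
    | none => (none, none)   -- IndexError in Python; unreachable under Pre_
    | some h0 =>
      let h := PySem.Str.lower h0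
      if h = "tickets" ∨ h = "ticket" then (some i, some "tickets")
      else if h = "ncash" ∨ h = "ncash_val" ∨ h = "ncashval" then (some i, some "ncash")
      else fvcA_loop raw rest

def find_value_col_py (raw_headers : List String) (id_pos : Int) : Option Int × Option String :=
  let n : Int := raw_headers.length
  let next_id := fvcA_nextId raw_headers (PySem.List.pyRange (id_pos + 1) n 1) n
  fvcA_loop raw_headers (PySem.List.pyRange (id_pos + 1) next_id 1)

-- ===== PORT B =====
-- the module-level classification table _LABELS
def fvcB_labels : PySem.Dict String String :=
  PySem.Dict.mk [("tickets", "tickets"), ("ticket", "tickets"),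
                 ("ncash", "ncash"), ("ncash_val", "ncash"), ("ncashval", "ncash")]

-- the while loop: i counts up while i < n, 'id' breaks, a table hit returns
def fvcB_go (raw : List String) (i : Int) : Option Int × Option String :=
  if _hlt : i < (raw.length : Int) then
    match PySem.List.pyGet? raw i with
    | none => (none, none)   -- IndexError in Python; unreachable under Pre_
    | some h0 =>
      let h := PySem.Str.lower h0
      if h = "id" then (none, none)          -- break, then the final return
      else
        match fvcB_labels.get? h with
        | some lab => (some i, some lab)
        | none => fvcB_go raw (i + 1)
  else (none, none)
termination_by ((raw.length : Int) - i).toNat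
decreasing_by omega

def find_value_col_py_alt (raw_headers : List String) (id_pos : Int) : Option Int × Option String :=
  fvcB_go raw_headers (id_pos + 1)

-- ===== PRECONDITION & SPEC =====
-- A (and B) raise IndexError exactly when id_pos + 1 < -len(raw_headers): the very first
-- negative index of the scan is past the front of the list. Pre_ excludes exactly those inputs.
def Pre_find_value_col_py (raw_headers : List String) (id_pos : Int) : Prop :=
  -(raw_headers.length : Int) ≤ id_pos + 1
instance (raw_headers : List String) (id_pos : Int) : Decidable (Pre_find_value_col_py raw_headers id_pos) := by
  unfold Pre_find_value_col_py; infer_instance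

def pvWitness_find_value_col_py : List String × Int := (["id", "foo", "Tickets"], 0)

def Spec_find_value_col_py (raw_headers : List String) (id_pos : Int) (out : Option Int × Option String) : Prop := out = find_value_col_py_alt raw_headers id_pos
instance (raw_headers : List String) (id_pos : Int) (out : Option Int × Option String) : Decidable (Spec_find_value_col_py raw_headers id_pos out) := by unfold Spec_find_value_col_py; infer_instance

-- ===== CLAIM (what is proved, stated in full; the proofs are below) =====
def Claim_equal_find_value_col_py : Prop := ∀ (raw_headers : List String) (id_pos : Int), Dom_find_value_col_py raw_headers id_pos → Pre_find_value_col_py raw_headers id_pos → Spec_find_value_col_py raw_headers id_pos (find_value_col_py raw_headers id_pos)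

-- ===== LEMMAS AND PROOFS =====

-- the classification table, read off as a branch chain
theorem fvcB_labels_get (h : String) :
    fvcB_labels.get? h
      = if h = "tickets" ∨ h = "ticket" then some "tickets"
        else if h = "ncash" ∨ h = "ncash_val" ∨ h = "ncashval" then some "ncash"
        else none := by
  by_cases h1 : h = "tickets" ∨ h = "ticket"
  · rcases h1 with rfl | rfl <;> decide
  · by_cases h2 : h = "ncash" ∨ h = "ncash_val" ∨ h = "ncashval"
    · rcases h2 with rfl | rfl | rfl <;> decide
    · push Not at h1 h2
      rw [if_neg (by tauto), if_neg (by tauto)]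
      simp [fvcB_labels, PySem.Dict.get?,
            Ne.symm h1.1, Ne.symm h1.2, Ne.symm h2.1, Ne.symm h2.2.1, Ne.symm h2.2.2]

-- the generator's result is either its default or one of the scanned indices
theorem fvcA_nextId_mem (raw : List String) (L : List Int) (d : Int) :
    fvcA_nextId raw L d = d ∨ fvcA_nextId raw L d ∈ L := by
  induction L with
  | nil => left; rfl
  | cons i rest ih =>
    unfold fvcA_nextId
    cases h : PySem.List.pyGet? raw i with
    | none => left; rfl
    | some v =>
      by_cases hid : PySem.Str.lower v = "id"
      · simp [hid]
      · simp only [hid, if_false]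
        rcases ih with h1 | h1
        · left; exact h1
        · right; exact List.mem_cons_of_mem _ h1

-- an in-range index always yields a header
theorem fvc_get_some (raw : List String) (i : Int)
    (h1 : -(raw.length : Int) ≤ i) (h2 : i < (raw.length : Int)) :
    ∃ v, PySem.List.pyGet? raw i = some v := by
  cases h : PySem.List.pyGet? raw i with
  | some v => exact ⟨v, rfl⟩
  | none =>
    rw [PySem.List.pyGet?_eq_none_iff] at h
    exact absurd ⟨h1, h2⟩ h

-- key invariant: A's two-phase scan from s equals B's while loop from s
theorem fvc_key (raw : List String) : ∀ (fuel : Nat) (s : Int),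
    (((raw.length : Int) - s).toNat ≤ fuel) → -(raw.length : Int) ≤ s →
    fvcA_loop raw (PySem.List.pyRange s
        (fvcA_nextId raw (PySem.List.pyRange s (raw.length : Int) 1) (raw.length : Int)) 1)
      = fvcB_go raw s := by
  intro fuel
  induction fuel with
  | zero =>
    intro s hf hs
    have hns : (raw.length : Int) ≤ s := by omega
    rw [fvcB_go, dif_neg (by omega)]
    rw [PySem.List.pyRange_one_eq_nil hns]
    unfold fvcA_nextId
    rw [PySem.List.pyRange_one_eq_nil hns]
    rfl
  | succ fuel ih =>
    intro s hf hs
    by_cases hlt : s < (raw.length : Int)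
    · obtain ⟨v, hv⟩ := fvc_get_some raw s hs hlt
      rw [fvcB_go, dif_pos hlt, hv]
      rw [PySem.List.pyRange_one_cons hlt]
      by_cases hid : PySem.Str.lower v = "id"
      · -- next_id = s : A's bounded range is empty; B breaks at once
        simp only [fvcA_nextId, hv, hid]
        simp only [reduceIte]
        rw [PySem.List.pyRange_one_eq_nil (le_refl s)]
        rfl
      · -- head is not 'id': A's branch chain is B's table lookup; both recurse together
        have hA : fvcA_nextId raw (s :: PySem.List.pyRange (s + 1) (raw.length : Int) 1) (raw.length : Int)
            = fvcA_nextId raw (PySem.List.pyRange (s + 1) (raw.length : Int) 1) (raw.length : Int) := by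
          simp only [fvcA_nextId, hv, hid, if_false]
        rw [hA]
        set m := fvcA_nextId raw (PySem.List.pyRange (s + 1) (raw.length : Int) 1) (raw.length : Int) with hm
        have hsm : s < m := by
          rcases fvcA_nextId_mem raw (PySem.List.pyRange (s + 1) (raw.length : Int) 1) (raw.length : Int) with h1 | h1
          · omega
          · have := (PySem.List.mem_pyRange_one).1 h1
            omega
        rw [PySem.List.pyRange_one_cons hsm]
        simp only [fvcA_loop, hv, hid, if_false, fvcB_labels_get]
        split_ifs with h1 h2
        · rfl
        · rfl
        · exact ih (s + 1) (by omega) (by omega)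
    · have hns : (raw.length : Int) ≤ s := by omega
      rw [fvcB_go, dif_neg (by omega)]
      rw [PySem.List.pyRange_one_eq_nil hns]
      unfold fvcA_nextId
      rw [PySem.List.pyRange_one_eq_nil hns]
      rfl

-- ===== VERDICT (by name: the statement is the Claim_ definition above) =====
theorem find_value_col_py_spec : Claim_equal_find_value_col_py := by
  intro raw_headers id_pos _ hpre
  unfold Spec_find_value_col_py find_value_col_py find_value_col_py_alt
  exact fvc_key raw_headers ((raw_headers.length : Int) - (id_pos + 1)).toNat (id_pos + 1) (le_refl _) hpre
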